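-- pv_equiv track=rewrite | github.com/Mattchaup/Cruciverbix | funThings.py | palymReturn
-- ===== SOURCE A (Python) =====
-- def palymReturn(mot,coress):
--     if len(mot)==0:
--         return True
--     elif len(mot) == 1:
--         if mot in coress:
--             if coress[mot] == mot:
--                 return True
--     elif mot[0] in coress:
--         if mot[-1] == coress[mot[0]]:
--             return palymReturn(mot[1:-1],coress)
--         return False
--     return False
-- ===== SOURCE B (Python) =====
-- def palymReturn(mot, coress):
--     half = (len(mot) + 1) // 2
--     return all(coress.get(a) == b for a, b in zip(mot[:half], reversed(mot)))
-- ===== Notes on version B (the rewrite author's own statement) =====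
-- stated objective: alternative
-- what changed: Replaced A's recursion that repeatedly re-slices mot[1:-1] with a single non-recursive pass testing coress.get(a) == b over zip(mot[:half], reversed(mot)).
import Mathlib
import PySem

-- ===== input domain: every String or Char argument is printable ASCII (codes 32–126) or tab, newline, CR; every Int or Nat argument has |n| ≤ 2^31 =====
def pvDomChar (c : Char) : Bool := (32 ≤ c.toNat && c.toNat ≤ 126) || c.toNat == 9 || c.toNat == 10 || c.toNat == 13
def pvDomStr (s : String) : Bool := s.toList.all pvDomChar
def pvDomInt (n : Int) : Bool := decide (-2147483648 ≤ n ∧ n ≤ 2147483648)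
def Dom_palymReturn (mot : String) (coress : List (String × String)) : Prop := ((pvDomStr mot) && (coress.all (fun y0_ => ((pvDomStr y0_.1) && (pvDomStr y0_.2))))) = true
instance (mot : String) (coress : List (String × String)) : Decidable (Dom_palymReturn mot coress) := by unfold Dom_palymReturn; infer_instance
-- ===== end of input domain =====

-- B replaces A's slicing recursion by a single non-recursive pass over zip(mot[:half], reversed(mot)) (alternative algorithm; return value agreed everywhere).

-- ===== PORT A =====
-- recursion over the char list of mot; dict lookup = first match on the association list
def pvPalA (coress : List (String × String)) (l : List Char) : Bool :=
  if l.length = 0 then true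
  else if l.length = 1 then
    match coress.lookup (String.ofList l) with         -- 'mot in coress' + 'coress[mot]'
    | some v => v == String.ofList l                   -- 'coress[mot] == mot'
    | none => false
  else
    match PySem.List.pyGet? l 0 with               -- mot[0]
    | none => false
    | some c0 =>
      match coress.lookup (String.ofList [c0]) with    -- 'mot[0] in coress' + 'coress[mot[0]]'
      | none => false
      | some v =>
        match PySem.List.pyGet? l (-1) with        -- mot[-1]
        | none => false
        | some cl =>
          if String.ofList [cl] == v then
            pvPalA coress (PySem.List.slice l (some 1) (some (-1)))   -- mot[1:-1]
          else false
termination_by l.length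
decreasing_by
  simp only [PySem.List.length_slice, PySem.List.clampIdx_neg_one]
  have : PySem.List.clampIdx l.length 1 = min 1 l.length := by
    simpa using PySem.List.clampIdx_natCast (n := l.length) (k := 1)
  omega

def palymReturn (mot : String) (coress : List (String × String)) : Bool :=
  pvPalA coress mot.toList

-- ===== PORT B =====
-- the per-pair test 'coress.get(a) == b' (None compares unequal to any string)
def pvBCheck (coress : List (String × String)) (p : Char × Char) : Bool :=
  match coress.lookup (String.ofList [p.1]) with
  | some v => v == String.ofList [p.2]
  | none => false

def palymReturn_alt (mot : String) (coress : List (String × String)) : Bool :=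
  let l := mot.toList
  let half := (l.length + 1) / 2                   -- (len(mot)+1)//2 on a nonnegative int
  ((l.take half).zip l.reverse).all (pvBCheck coress)   -- zip(mot[:half], reversed(mot))

-- ===== PRECONDITION & SPEC =====
def Spec_palymReturn (mot : String) (coress : List (String × String)) (out : Bool) : Prop := out = palymReturn_alt mot coress
instance (mot : String) (coress : List (String × String)) (out : Bool) : Decidable (Spec_palymReturn mot coress out) := by unfold Spec_palymReturn; infer_instance

-- ===== CLAIM (what is proved, stated in full; the proofs are below) =====
def Claim_equal_palymReturn : Prop := ∀ (mot : String) (coress : List (String × String)), Dom_palymReturn mot coress → Spec_palymReturn mot coress (palymReturn mot coress)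

-- ===== LEMMAS AND PROOFS =====

-- zip truncates to the shorter list: appending beyond the first list's length changes nothing
theorem pv_zip_append_of_le {α β : Type} (xs : List α) (ys zs : List β)
    (h : xs.length ≤ ys.length) : xs.zip (ys ++ zs) = xs.zip ys := by
  induction xs generalizing ys with
  | nil => simp
  | cons x xt ih =>
    cases ys with
    | nil => simp at h
    | cons y yt =>
      simp only [List.cons_append, List.zip_cons_cons, List.cons.injEq, true_and]
      exact ih yt (by simpa using h)

def pvBAll (coress : List (String × String)) (l : List Char) : Bool :=
  ((l.take ((l.length + 1) / 2)).zip l.reverse).all (pvBCheck coress)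

theorem pvBAll_concat (coress : List (String × String)) (c d : Char) (m : List Char) :
    pvBAll coress (c :: (m ++ [d])) = (pvBCheck coress (c, d) && pvBAll coress m) := by
  unfold pvBAll
  have hlen : (c :: (m ++ [d])).length = m.length + 2 := by simp
  have hhalf : ((c :: (m ++ [d])).length + 1) / 2 = (m.length + 1) / 2 + 1 := by
    rw [hlen]; omega
  rw [hhalf]
  have htk : (m ++ [d]).take ((m.length + 1) / 2) = m.take ((m.length + 1) / 2) := by
    apply List.take_append_of_le_length; omega
  have hrev : (c :: (m ++ [d])).reverse = d :: (m.reverse ++ [c]) := by simp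
  rw [List.take_succ_cons, htk, hrev, List.zip_cons_cons, List.all_cons]
  congr 1
  rw [pv_zip_append_of_le _ _ _ (by simp)]

theorem pv_main (coress : List (String × String)) :
    ∀ (n : Nat) (l : List Char), l.length = n → pvPalA coress l = pvBAll coress l := by
  intro n
  induction n using Nat.strong_induction_on with
  | _ n ih =>
    intro l hl
    match l with
    | [] => simp [pvPalA, pvBAll]
    | [c] =>
      rw [pvPalA]
      cases hk : coress.lookup (String.ofList [c]) <;>
        simp [pvBAll, pvBCheck, hk]
    | c :: x :: rest =>
      obtain ⟨m, d, hmd⟩ : ∃ m d, x :: rest = m ++ [d] := by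
        rcases List.eq_nil_or_concat (x :: rest) with h | ⟨m, d, h⟩
        · simp at h
        · exact ⟨m, d, by simpa using h⟩
      rw [pvPalA]
      have hlen2 : (c :: x :: rest).length = m.length + 2 := by
        simp only [hmd]; simp
      rw [if_neg (by omega), if_neg (by omega)]
      have hget0 : PySem.List.pyGet? (c :: x :: rest) 0 = some c := by
        simp [PySem.List.pyGet?_zero_cons]
      have hgetl : PySem.List.pyGet? (c :: x :: rest) (-1) = some d := by
        rw [PySem.List.pyGet?_neg_one, hmd,
          show c :: (m ++ [d]) = (c :: m) ++ [d] by simp]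
        exact List.getLast?_concat
      have hslice : PySem.List.slice (c :: x :: rest) (some 1) (some (-1)) = m := by
        rw [show c :: x :: rest = c :: (m ++ [d]) by rw [hmd]]
        simp [PySem.List.slice]
      rw [hget0, hgetl, hslice]
      rw [show c :: x :: rest = c :: (m ++ [d]) by rw [hmd], pvBAll_concat]
      have hrec := ih m.length (by omega) m rfl
      cases hkey : coress.lookup (String.ofList [c]) with
      | none => simp [pvBCheck, hkey]
      | some v =>
        by_cases hv : v = String.ofList [d]
        · have h1 : (String.ofList [d] == v) = true := by simp [hv]
          have h2 : (v == String.ofList [d]) = true := by simp [hv]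
          simp [h1, pvBCheck, hkey, h2, hrec]
        · have h1 : (String.ofList [d] == v) = false := by
            simp; exact fun h => hv h.symm
          have h2 : (v == String.ofList [d]) = false := by simp [hv]
          simp [h1, pvBCheck, hkey, h2]

-- ===== VERDICT (by name: the statement is the Claim_ definition above) =====
theorem palymReturn_spec : Claim_equal_palymReturn := by
  intro mot coress _
  unfold Spec_palymReturn palymReturn palymReturn_alt
  exact pv_main coress mot.toList.length mot.toList rfl
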